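-- pv_equiv track=rewrite | github.com/jizhuoran/caffe-huawei-atlas-convertor | convertor/huawei/te/lang/cce/te_schedule/layer_norm_grad_schedule.py | _find_closest_factor
-- ===== SOURCE A (Python) =====
-- def _find_closest_factor(factors, m_val):
--     if not factors:
--         return None
--     factors.sort()
--     index = 0
--     is_find = False
--     for i in range(0, len(factors), 1):
--         if factors[i] > m_val:
--             index = i
--             is_find = True
--             break
--     if is_find:
--         if index > 0:
--             index = index - 1
--     else:
--         index = len(factors) - 1
--
--     closest_factor = factors[index]
--     return closest_factor
-- ===== SOURCE B (Python) =====
-- def _find_closest_factor(factors, m_val):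
--     if not factors:
--         return None
--     factors.sort()
--     lo, hi = 0, len(factors)
--     while lo < hi:
--         mid = (lo + hi) // 2
--         if factors[mid] <= m_val:
--             lo = mid + 1
--         else:
--             hi = mid
--     return factors[0] if lo == 0 else factors[lo - 1]
-- ===== Notes on version B (the rewrite author's own statement) =====
-- stated objective: alternative
-- what changed: Replaces the linear scan for the first factor exceeding m_val with a hand-written binary search (upper-bound bisection) over the sorted list, then picks factors[lo-1] (or factors[0] when all factors exceed m_val); the scan after sorting drops from O(n) to O(log n), though sorting still dominates.
import Mathlib
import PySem

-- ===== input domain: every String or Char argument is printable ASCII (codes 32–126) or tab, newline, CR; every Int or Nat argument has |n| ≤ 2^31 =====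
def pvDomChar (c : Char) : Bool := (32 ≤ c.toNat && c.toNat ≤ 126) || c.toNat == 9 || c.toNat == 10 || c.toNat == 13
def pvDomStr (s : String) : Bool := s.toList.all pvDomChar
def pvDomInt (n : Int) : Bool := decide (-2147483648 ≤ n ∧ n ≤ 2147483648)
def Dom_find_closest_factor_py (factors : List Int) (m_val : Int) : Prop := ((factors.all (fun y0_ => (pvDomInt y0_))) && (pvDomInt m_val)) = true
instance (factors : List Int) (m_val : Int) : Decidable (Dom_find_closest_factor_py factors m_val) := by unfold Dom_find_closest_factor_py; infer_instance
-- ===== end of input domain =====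

-- B replaces A's linear scan (after sorting) by a binary search for the first factor > m_val;
-- same return value everywhere, and both sort the argument in place in Python (alternative, not faster).

-- ===== PORT A =====
-- the 'for i in range(len(factors))' scan with break: returns the first index i (offset by acc) with x > m
def pvAFind (xs : List Int) (m : Int) (i : Nat) : Option Nat :=
  match xs with
  | [] => none
  | x :: rest => if x > m then some i else pvAFind rest m (i + 1)

def find_closest_factor_py (factors : List Int) (m_val : Int) : Option Int :=
  if factors.isEmpty then none
  else
    let s := PySem.List.sorted factors (fun x => x) false
    let index : Nat :=
      match pvAFind s m_val 0 with
      | some i => if i > 0 then i - 1 else i      -- is_find = True branch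
      | none => s.length - 1                       -- is_find = False branch
    PySem.List.pyGet? s (index : Int)              -- index is always in range here

-- ===== PORT B =====
-- the 'while lo < hi' binary search of Source B
def pvBsearch (s : List Int) (m : Int) (lo hi : Nat) : Nat :=
  if _h : lo < hi then
    let mid := (lo + hi) / 2
    if (PySem.List.pyGet? s (mid : Int)).getD 0 ≤ m then pvBsearch s m (mid + 1) hi
    else pvBsearch s m lo mid
  else lo
termination_by hi - lo
decreasing_by all_goals omega

def find_closest_factor_py_alt (factors : List Int) (m_val : Int) : Option Int :=
  if factors.isEmpty then none
  else
    let s := PySem.List.sorted factors (fun x => x) false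
    let lo := pvBsearch s m_val 0 s.length
    if lo = 0 then PySem.List.pyGet? s ((0 : Nat) : Int)
    else PySem.List.pyGet? s ((lo - 1 : Nat) : Int)

-- ===== PRECONDITION & SPEC =====
def Spec_find_closest_factor_py (factors : List Int) (m_val : Int) (out : Option Int) : Prop := out = find_closest_factor_py_alt factors m_val
instance (factors : List Int) (m_val : Int) (out : Option Int) : Decidable (Spec_find_closest_factor_py factors m_val out) := by unfold Spec_find_closest_factor_py; infer_instance

-- ===== CLAIM (what is proved, stated in full; the proofs are below) =====
def Claim_equal_find_closest_factor_py : Prop := ∀ (factors : List Int) (m_val : Int), Dom_find_closest_factor_py factors m_val → Spec_find_closest_factor_py factors m_val (find_closest_factor_py factors m_val)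

-- ===== LEMMAS AND PROOFS =====

-- cnt = length of the ≤-m prefix of the sorted list; both ports' index is derived from it.

-- A's scan returns the index of the first element > m, i.e. the takeWhile length (no sortedness needed)
theorem pvAFind_eq (m : Int) : ∀ (s : List Int) (i : Nat),
    pvAFind s m i =
      (if (s.takeWhile (fun x => decide (x ≤ m))).length < s.length
       then some (i + (s.takeWhile (fun x => decide (x ≤ m))).length) else none) := by
  intro s
  induction s with
  | nil => intro i; simp [pvAFind]
  | cons x t ih =>
      intro i
      by_cases hx : x ≤ m
      · have : ¬ x > m := by omega
        simp only [pvAFind, this, if_false, List.takeWhile, hx, decide_true, ih (i + 1)]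
        by_cases h : (t.takeWhile (fun x => decide (x ≤ m))).length < t.length <;>
          simp [h, List.length_cons] <;> omega
      · have hx' : x > m := by omega
        simp [pvAFind, hx', List.takeWhile, hx]

-- characterisation of cnt on a sorted list: position i holds a value ≤ m iff i < cnt
theorem cnt_char (m : Int) : ∀ (s : List Int), s.Pairwise (fun a b => a ≤ b) →
    ∀ i, i < s.length →
      (s.getD i 0 ≤ m ↔ i < (s.takeWhile (fun x => decide (x ≤ m))).length) := by
  intro s
  induction s with
  | nil => intro _ i hi; simp at hi
  | cons x t ih =>
      intro hp i hi
      have hx_le := (List.pairwise_cons.mp hp).1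
      have ht := (List.pairwise_cons.mp hp).2
      by_cases hx : x ≤ m
      · cases i with
        | zero => simp [List.takeWhile, hx]
        | succ j =>
            have hj : j < t.length := by simpa using hi
            simpa [List.takeWhile, hx, List.getD_cons_succ, Nat.succ_lt_succ_iff] using ih ht j hj
      · cases i with
        | zero => simp [List.takeWhile, hx]
        | succ j =>
            have hj : j < t.length := by simpa using hi
            have hmem : t.getD j 0 ∈ t := by
              rw [List.getD_eq_getElem _ _ hj]; exact List.getElem_mem hj
            have hxt : x ≤ t.getD j 0 := hx_le _ hmem
            have hgd : t[j]?.getD 0 = t.getD j 0 := by simp [List.getD]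
            rw [List.getD_cons_succ]
            simp [List.takeWhile, hx, ← hgd] at hxt ⊢
            omega

-- binary-search correctness on any list satisfying the cnt characterisation
theorem pvBsearch_eq (s : List Int) (m : Int) (cnt : Nat)
    (hP : ∀ i, i < s.length → (s.getD i 0 ≤ m ↔ i < cnt)) :
    ∀ n lo hi, hi - lo = n → lo ≤ cnt → cnt ≤ hi → hi ≤ s.length → pvBsearch s m lo hi = cnt := by
  intro n
  induction n using Nat.strong_induction_on with
  | _ n ih =>
      intro lo hi hn hlo hhi hlen
      rw [pvBsearch]
      by_cases h : lo < hi
      · simp only [h, dif_pos]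
        have hmid : (lo + hi) / 2 < hi := by omega
        have hmids : (lo + hi) / 2 < s.length := by omega
        have hget : (PySem.List.pyGet? s (((lo + hi) / 2 : Nat) : Int)).getD 0 = s.getD ((lo + hi) / 2) 0 := by
          rw [PySem.List.pyGet?_natCast]; simp [List.getD]
        by_cases hc : s.getD ((lo + hi) / 2) 0 ≤ m
        · have hlt : (lo + hi) / 2 < cnt := (hP _ hmids).mp hc
          simp only [hget, hc, if_true]
          exact ih (hi - ((lo + hi) / 2 + 1)) (by omega) _ _ rfl (by omega) hhi hlen
        · have hge : cnt ≤ (lo + hi) / 2 := by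
            have := (hP _ hmids).mpr; omega
          simp only [hget, hc, if_false]
          exact ih ((lo + hi) / 2 - lo) (by omega) _ _ rfl hlo hge (by omega)
      · simp only [h, dif_neg, not_false_iff]
        omega

-- ===== VERDICT (by name: the statement is the Claim_ definition above) =====
theorem find_closest_factor_py_spec : Claim_equal_find_closest_factor_py := by
  intro factors m_val _
  unfold Spec_find_closest_factor_py find_closest_factor_py find_closest_factor_py_alt
  by_cases he : factors.isEmpty
  · simp [he]
  · simp only [he, Bool.false_eq_true, if_false]
    set s := PySem.List.sorted factors (fun x => x) false with hs
    set cnt := (s.takeWhile (fun x => decide (x ≤ m_val))).length with hcnt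
    have hsp : s.Pairwise (fun a b => a ≤ b) := PySem.List.sorted_pairwise factors (fun x => x)
    have hP := cnt_char m_val s hsp
    have hcl : cnt ≤ s.length := by
      rw [hcnt]; exact (List.takeWhile_prefix _).length_le
    have hslen : 0 < s.length := by
      have : s.length = factors.length := PySem.List.length_sorted ..
      rw [this]
      cases factors with
      | nil => simp at he
      | cons a t => simp
    have hb : pvBsearch s m_val 0 s.length = cnt :=
      pvBsearch_eq s m_val cnt hP _ 0 s.length rfl (Nat.zero_le _) hcl le_rfl
    rw [pvAFind_eq, hb]
    have hz : PySem.List.pyGet? s 0 = s[0]? := by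
      simpa using PySem.List.pyGet?_natCast (xs := s) (n := 0)
    by_cases h0 : cnt = 0
    · have hlt : cnt < s.length := by omega
      simp [← hcnt, hlt, h0, hslen, hz]
    · by_cases hlt : cnt < s.length
      · simp only [← hcnt, hlt, if_true, Nat.zero_add, h0, if_false]
        have : cnt > 0 := by omega
        simp [this]
      · have : ¬ ((s.takeWhile (fun x => decide (x ≤ m_val))).length < s.length) := by
          rw [← hcnt]; exact hlt
        simp only [this, if_false, h0]
        have : s.length - 1 = cnt - 1 := by omega
        simp [this]
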